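-- pv_equiv track=rewrite | github.com/artifu/brazuka-scout | audit_player.py | alias_in_names
-- ===== SOURCE A (Python) =====
-- def alias_in_names(aliases: list[str], names: list[str]) -> bool:
--     """
--     Return True if any alias matches any name in the extracted list.
--
--     Rules (in priority order):
--     1. Exact match: alias == name
--     2. Alias is a strict suffix of name (handles "joao b" matching "joao barros")
--     3. Name is a suffix of alias (handles "mazza" matching "marcelo mazza")
--
--     We deliberately avoid simple substring to prevent "marcelo" matching alias
--     "marcelo mazza" (which would confuse Marcelo D with Mazza).
--     """
--     for alias in sorted(aliases, key=len, reverse=True):  # longest alias first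
--         for name in names:
--             if alias == name:
--                 return True
--             # name starts with alias as a whole word: "mazza bandido" matches alias "mazza"
--             if name.startswith(alias) and (len(name) == len(alias) or name[len(alias)] in ' +-✅'):
--                 return True
--             # alias starts with name as a whole word: "joao b" in list matches alias "joao barros"
--             if alias.startswith(name) and (len(alias) == len(name) or alias[len(name)] in ' +-'):
--                 return True
--     return False
-- ===== SOURCE B (Python) =====
-- def _boundary_prefixes(s, chars):
--     # strict prefixes of s cut right before a boundary character
--     return [s[:i] for i, c in enumerate(s) if c in chars]
--
--
-- def alias_in_names(aliases, names):
--     name_set = set(names)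
--     # every strict boundary-prefix of any name (rule 2 candidates)
--     name_prefixes = set()
--     for n in names:
--         name_prefixes.update(_boundary_prefixes(n, ' +-✅'))
--     for a in aliases:
--         if a in name_set or a in name_prefixes:
--             return True
--         if any(p in name_set for p in _boundary_prefixes(a, ' +-')):
--             return True
--     return False
-- ===== Notes on version B (the rewrite author's own statement) =====
-- stated objective: faster
-- what changed: Replaces A's all-pairs scan of (sorted aliases) x names by two hash sets built once - the names and every boundary-prefix of a name - so each alias is checked by O(L) set lookups instead of being compared against every name.
import Mathlib
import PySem

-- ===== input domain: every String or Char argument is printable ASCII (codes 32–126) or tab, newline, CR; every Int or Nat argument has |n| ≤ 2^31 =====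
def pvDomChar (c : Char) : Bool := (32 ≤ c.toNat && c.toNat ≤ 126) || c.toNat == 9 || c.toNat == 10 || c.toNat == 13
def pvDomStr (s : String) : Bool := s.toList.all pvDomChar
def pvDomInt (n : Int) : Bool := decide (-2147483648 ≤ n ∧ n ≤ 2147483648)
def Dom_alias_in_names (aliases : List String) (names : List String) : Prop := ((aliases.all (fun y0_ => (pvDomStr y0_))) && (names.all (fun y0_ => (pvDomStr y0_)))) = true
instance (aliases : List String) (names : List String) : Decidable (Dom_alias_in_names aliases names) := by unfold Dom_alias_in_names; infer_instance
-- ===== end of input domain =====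

-- B replaces A's all-pairs scan over the sorted aliases by set lookups: the names and all their
-- boundary-prefixes go into hash sets built once, then each alias is checked by membership.

-- ===== PORT A =====
-- "c in ' +-✅'" / "c in ' +-'" on a single char = membership among those characters (exact)
def pvBnd2 (c : Char) : Bool := c == ' ' || c == '+' || c == '-' || c == '✅'
def pvBnd1 (c : Char) : Bool := c == ' ' || c == '+' || c == '-'

-- the inner 'for name in names' loop with its three early returns, in order
def pvInnerA (al : String) : List String → Bool
  | [] => false
  | name :: rest =>
    if al == name then true
    else if PySem.Str.startswith name al &&
        (PySem.Str.len name == PySem.Str.len al ||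
          (match PySem.Str.pyGet? name (PySem.Str.len al) with
           | some c => pvBnd2 c
           | none => false)) then true
    else if PySem.Str.startswith al name &&
        (PySem.Str.len al == PySem.Str.len name ||
          (match PySem.Str.pyGet? al (PySem.Str.len name) with
           | some c => pvBnd1 c
           | none => false)) then true
    else pvInnerA al rest

def pvOuterA (names : List String) : List String → Bool
  | [] => false
  | al :: rest => if pvInnerA al names then true else pvOuterA names rest

def alias_in_names (aliases : List String) (names : List String) : Bool :=
  pvOuterA names (PySem.List.sorted aliases (fun s => PySem.Str.len s) true)

-- ===== PORT B =====
-- [s[:i] for i, c in enumerate(s) if c in chars]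
def pvBoundaryPrefixes (s : String) (chars : List Char) : List String :=
  ((PySem.List.enumerate s.toList).filter (fun p => chars.contains p.2)).map
    (fun p => String.ofList (PySem.List.slice s.toList none (some p.1)))

def pvLoopB (nameSet namePrefixes : PySem.Set String) : List String → Bool
  | [] => false
  | a :: rest =>
    if PySem.Set.contains nameSet a || PySem.Set.contains namePrefixes a then true
    else if (pvBoundaryPrefixes a [' ', '+', '-']).any
        (fun p => PySem.Set.contains nameSet p) then true
    else pvLoopB nameSet namePrefixes rest

def alias_in_names_alt (aliases : List String) (names : List String) : Bool :=
  pvLoopB (PySem.Set.ofList names)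
    (names.foldl (fun s n => PySem.Set.update s (pvBoundaryPrefixes n [' ', '+', '-', '✅']))
      PySem.Set.empty)
    aliases

-- ===== PRECONDITION & SPEC =====
def Spec_alias_in_names (aliases : List String) (names : List String) (out : Bool) : Prop := out = alias_in_names_alt aliases names
instance (aliases : List String) (names : List String) (out : Bool) : Decidable (Spec_alias_in_names aliases names out) := by unfold Spec_alias_in_names; infer_instance

-- ===== CLAIM (what is proved, stated in full; the proofs are below) =====
def Claim_equal_alias_in_names : Prop := ∀ (aliases : List String) (names : List String), Dom_alias_in_names aliases names → Spec_alias_in_names aliases names (alias_in_names aliases names)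

-- ===== LEMMAS AND PROOFS =====

-- the match relation both programs decide, as a Prop (proof helper)
def pvMatchProp (al n : String) : Prop :=
  al = n ∨ al ∈ pvBoundaryPrefixes n [' ', '+', '-', '✅'] ∨
    n ∈ pvBoundaryPrefixes al [' ', '+', '-']

theorem pvBnd2_iff (c : Char) : c ∈ ([' ', '+', '-', '✅'] : List Char) ↔ pvBnd2 c = true := by
  simp [pvBnd2, or_assoc]

theorem pvBnd1_iff (c : Char) : c ∈ ([' ', '+', '-'] : List Char) ↔ pvBnd1 c = true := by
  simp [pvBnd1, or_assoc]

theorem pvBoundaryPrefixes_mem (a s : String) (C : List Char) :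
    a ∈ pvBoundaryPrefixes s C ↔
      ∃ k, ∃ _ : k < s.toList.length, s.toList[k] ∈ C ∧ a.toList = s.toList.take k := by
  unfold pvBoundaryPrefixes
  simp only [List.mem_map, List.mem_filter, PySem.List.mem_enumerate_iff]
  constructor
  · rintro ⟨p, ⟨⟨k, hk, rfl⟩, hc⟩, rfl⟩
    refine ⟨k, hk, by simpa using hc, ?_⟩
    rw [PySem.List.slice_to _ (by positivity)]
    simp
  · rintro ⟨k, hk, hc, ha⟩
    refine ⟨((k : Int), s.toList[k]), ⟨⟨k, hk, by simp⟩, by simpa using hc⟩, ?_⟩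
    rw [PySem.List.slice_to _ (by positivity)]
    simp only [Int.toNat_natCast]
    rw [← ha, String.ofList_toList]

-- one startswith-plus-boundary branch of A = exact match or boundary-prefix membership
theorem pvBranch_iff (a n : String) (P : Char → Bool) (C : List Char)
    (hC : ∀ c, c ∈ C ↔ P c = true) :
    (PySem.Str.startswith n a &&
      (PySem.Str.len n == PySem.Str.len a ||
        (match PySem.Str.pyGet? n (PySem.Str.len a) with
         | some c => P c
         | none => false))) = true ↔
    (a = n ∨ a ∈ pvBoundaryPrefixes n C) := by
  rw [pvBoundaryPrefixes_mem]
  simp only [Bool.and_eq_true, PySem.Str.startswith_eq, PySem.Chars.startswith_iff,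
    Bool.or_eq_true, beq_iff_eq, PySem.Str.len_eq, Nat.cast_inj, PySem.Str.pyGet?_natCast]
  constructor
  · rintro ⟨hpre, heq | hm⟩
    · left
      have : a.toList = n.toList := hpre.eq_of_length heq.symm
      rw [← String.ofList_toList (s := a), this, String.ofList_toList]
    · right
      cases hget : n.toList[a.toList.length]? with
      | none => rw [hget] at hm; exact absurd hm (by simp)
      | some c =>
        rw [hget] at hm
        obtain ⟨hlt, hval⟩ := List.getElem?_eq_some_iff.mp hget
        refine ⟨a.toList.length, hlt, ?_, List.prefix_iff_eq_take.mp hpre⟩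
        rw [hval]
        exact (hC c).mpr hm
  · rintro (rfl | ⟨k, hk, hc, ha⟩)
    · exact ⟨List.prefix_refl _, Or.inl rfl⟩
    · have hlen : a.toList.length = k := by
        rw [ha, List.length_take, Nat.min_eq_left hk.le]
      refine ⟨?_, Or.inr ?_⟩
      · rw [List.prefix_iff_eq_take, hlen, ← ha]
      · rw [hlen, List.getElem?_eq_getElem hk]
        exact (hC _).mp hc

theorem pvMatch_decompose (al n : String) :
    pvMatchProp al n ↔
      ((al == n) = true ∨
        (PySem.Str.startswith n al &&
          (PySem.Str.len n == PySem.Str.len al ||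
            (match PySem.Str.pyGet? n (PySem.Str.len al) with
             | some c => pvBnd2 c
             | none => false))) = true ∨
        (PySem.Str.startswith al n &&
          (PySem.Str.len al == PySem.Str.len n ||
            (match PySem.Str.pyGet? al (PySem.Str.len n) with
             | some c => pvBnd1 c
             | none => false))) = true) := by
  rw [pvBranch_iff al n pvBnd2 _ pvBnd2_iff, pvBranch_iff n al pvBnd1 _ pvBnd1_iff]
  unfold pvMatchProp
  simp only [beq_iff_eq]
  constructor
  · rintro (h | h | h)
    · exact Or.inl h
    · exact Or.inr (Or.inl (Or.inr h))
    · exact Or.inr (Or.inr (Or.inr h))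
  · rintro (h | (h | h) | (h | h))
    · exact Or.inl h
    · exact Or.inl h
    · exact Or.inr (Or.inl h)
    · exact Or.inl h.symm
    · exact Or.inr (Or.inr h)

theorem pvInnerA_iff (al : String) (names : List String) :
    pvInnerA al names = true ↔ ∃ n ∈ names, pvMatchProp al n := by
  induction names with
  | nil => simp [pvInnerA]
  | cons n rest ih =>
    simp only [pvInnerA]
    split_ifs with h1 h2 h3
    · exact iff_of_true rfl ⟨n, by simp, (pvMatch_decompose al n).mpr (Or.inl h1)⟩
    · exact iff_of_true rfl ⟨n, by simp, (pvMatch_decompose al n).mpr (Or.inr (Or.inl h2))⟩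
    · exact iff_of_true rfl ⟨n, by simp, (pvMatch_decompose al n).mpr (Or.inr (Or.inr h3))⟩
    · rw [ih]
      constructor
      · rintro ⟨m, hm, hp⟩; exact ⟨m, by simp [hm], hp⟩
      · rintro ⟨m, hm, hp⟩
        rcases List.mem_cons.mp hm with rfl | hm'
        · rcases (pvMatch_decompose al m).mp hp with h | h | h
          · exact absurd h h1
          · exact absurd h h2
          · exact absurd h h3
        · exact ⟨m, hm', hp⟩

theorem pvOuterA_iff (names l : List String) :
    pvOuterA names l = true ↔ ∃ a ∈ l, pvInnerA a names = true := by
  induction l with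
  | nil => simp [pvOuterA]
  | cons a rest ih => by_cases h : pvInnerA a names = true <;> simp [pvOuterA, h, ih]

theorem pvLoopB_iff (ns ps : PySem.Set String) (l : List String) :
    pvLoopB ns ps l = true ↔ ∃ a ∈ l,
      (a ∈ ns ∨ a ∈ ps ∨ ∃ p ∈ pvBoundaryPrefixes a [' ', '+', '-'], p ∈ ns) := by
  induction l with
  | nil => simp [pvLoopB]
  | cons a rest ih =>
    simp only [pvLoopB]
    split_ifs with h1 h2
    · have h1' : PySem.Set.contains ns a = true ∨ PySem.Set.contains ps a = true := by
        simpa using h1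
      rcases h1' with h | h
      · exact iff_of_true rfl ⟨a, by simp, Or.inl ((PySem.Set.contains_iff _ _).mp h)⟩
      · exact iff_of_true rfl ⟨a, by simp, Or.inr (Or.inl ((PySem.Set.contains_iff _ _).mp h))⟩
    · obtain ⟨p, hp, hmem⟩ := List.any_eq_true.mp h2
      exact iff_of_true rfl
        ⟨a, by simp, Or.inr (Or.inr ⟨p, hp, (PySem.Set.contains_iff _ _).mp hmem⟩)⟩
    · rw [ih]
      constructor
      · rintro ⟨m, hm, hp⟩; exact ⟨m, by simp [hm], hp⟩
      · rintro ⟨m, hm, hp⟩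
        rcases List.mem_cons.mp hm with rfl | hm'
        · rcases hp with h | h | ⟨p, hp', hpn⟩
          · exact absurd (by simp [h] :
              (PySem.Set.contains ns m || PySem.Set.contains ps m) = true) h1
          · exact absurd (by simp [h] :
              (PySem.Set.contains ns m || PySem.Set.contains ps m) = true) h1
          · exact absurd (List.any_eq_true.mpr
              ⟨p, hp', (PySem.Set.contains_iff _ _).mpr hpn⟩) h2
        · exact ⟨m, hm', hp⟩

theorem pvFoldUpdate_mem (a : String) (l : List String) (s : PySem.Set String) :
    a ∈ l.foldl (fun s n => PySem.Set.update s (pvBoundaryPrefixes n [' ', '+', '-', '✅'])) s ↔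
      a ∈ s ∨ ∃ n ∈ l, a ∈ pvBoundaryPrefixes n [' ', '+', '-', '✅'] := by
  induction l generalizing s with
  | nil => simp
  | cons n rest ih =>
    simp only [List.foldl_cons, ih, PySem.Set.mem_update, List.mem_cons]
    constructor
    · rintro ((h | h) | ⟨m, hm, hp⟩)
      · exact Or.inl h
      · exact Or.inr ⟨n, Or.inl rfl, h⟩
      · exact Or.inr ⟨m, Or.inr hm, hp⟩
    · rintro (h | ⟨m, rfl | hm, hp⟩)
      · exact Or.inl (Or.inl h)
      · exact Or.inl (Or.inr hp)
      · exact Or.inr ⟨m, hm, hp⟩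

-- ===== VERDICT (by name: the statement is the Claim_ definition above) =====
theorem alias_in_names_spec : Claim_equal_alias_in_names := by
  unfold Claim_equal_alias_in_names
  intro aliases names _
  unfold Spec_alias_in_names alias_in_names alias_in_names_alt
  rw [Bool.eq_iff_iff, pvOuterA_iff, pvLoopB_iff]
  simp only [PySem.List.mem_sorted, pvInnerA_iff, PySem.Set.mem_ofList, pvFoldUpdate_mem,
    PySem.Set.empty, List.not_mem_nil, false_or]
  constructor
  · rintro ⟨a, ha, n, hn, hp⟩
    rcases hp with rfl | h | h
    · exact ⟨a, ha, Or.inl hn⟩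
    · exact ⟨a, ha, Or.inr (Or.inl ⟨n, hn, h⟩)⟩
    · exact ⟨a, ha, Or.inr (Or.inr ⟨n, h, hn⟩)⟩
  · rintro ⟨a, ha, h | ⟨n, hn, h⟩ | ⟨p, hp, hpn⟩⟩
    · exact ⟨a, ha, a, h, Or.inl rfl⟩
    · exact ⟨a, ha, n, hn, Or.inr (Or.inl h)⟩
    · exact ⟨a, ha, p, hpn, Or.inr (Or.inr hp)⟩
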